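-- pv_equiv track=rewrite | github.com/shughes-uk/python-twitchchat | twitchchat/chat.py | eliminate_duplicate_servers
-- ===== SOURCE A (Python) =====
-- def eliminate_duplicate_servers(channel_servers):
--     for key in list(channel_servers):
--         if key in channel_servers:
--             for other_key in list(channel_servers):
--                 if other_key != key and other_key in channel_servers:
--                     if channel_servers[other_key]['channel_set'].issubset(channel_servers[key]['channel_set']):
--                         del channel_servers[other_key]
--     for server in channel_servers:
--         for channel in channel_servers[server]['channel_set']:
--             for other_server in channel_servers:
--                 if other_server != server and channel in channel_servers[other_server]['channel_set']:
--                     channel_servers[other_server]['channel_set'].remove(channel)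
--     return channel_servers
-- ===== SOURCE B (Python) =====
-- def eliminate_duplicate_servers(channel_servers):
--     # Phase 1: one forward scan with a running `kept` list instead of nested
--     # snapshot loops with in-place deletion.  A later server whose set is a
--     # subset of a kept one is dropped; a kept server whose set is a subset of
--     # the new one is evicted from `kept`.
--     kept = []
--     for key in channel_servers:
--         cs = channel_servers[key]['channel_set']
--         if not any(cs <= channel_servers[j]['channel_set'] for j in kept):
--             kept = [j for j in kept if not channel_servers[j]['channel_set'] <= cs]
--             kept.append(key)
--     for dead in [k for k in channel_servers if k not in kept]:
--         del channel_servers[dead]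
--     # Phase 2: one forward scan threading a `seen` set; each channel stays in
--     # the first server that has it and is removed from that server's own set
--     # when already claimed, so the per-channel scan over all other servers
--     # disappears.
--     seen = set()
--     for server in channel_servers:
--         cs = channel_servers[server]['channel_set']
--         for channel in list(cs):
--             if channel in seen:
--                 cs.remove(channel)
--             else:
--                 seen.add(channel)
--     return channel_servers
-- ===== Notes on version B (the rewrite author's own statement) =====
-- stated objective: faster
-- what changed: Both of A's deletion passes become single forward scans: the subset-elimination pass threads a running `kept` list (append new server, evict kept subsets) instead of mutating the dict inside nested snapshot loops, and the channel-dedup pass threads a `seen` set and trims each server's own set once, eliminating the per-channel scan over all other servers.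
-- outside the precondition, e.g. on eliminate_duplicate_servers({'s1': {}}): A raises KeyError, B raises KeyError
import Mathlib
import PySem

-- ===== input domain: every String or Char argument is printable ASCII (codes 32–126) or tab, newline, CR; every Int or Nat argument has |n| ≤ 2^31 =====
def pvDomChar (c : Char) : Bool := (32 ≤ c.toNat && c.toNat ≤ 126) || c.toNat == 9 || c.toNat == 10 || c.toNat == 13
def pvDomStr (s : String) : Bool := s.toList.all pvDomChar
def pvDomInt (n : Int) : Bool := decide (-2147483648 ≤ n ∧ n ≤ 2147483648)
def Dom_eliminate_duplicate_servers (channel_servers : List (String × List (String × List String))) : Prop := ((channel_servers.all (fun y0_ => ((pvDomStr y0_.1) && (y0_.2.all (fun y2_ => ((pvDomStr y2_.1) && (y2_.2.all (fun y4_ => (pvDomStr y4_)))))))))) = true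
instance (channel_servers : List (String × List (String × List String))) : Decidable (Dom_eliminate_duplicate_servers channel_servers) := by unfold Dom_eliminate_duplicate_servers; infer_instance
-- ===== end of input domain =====

-- B replaces both of A's deletion passes by single forward scans (a running `kept` list
-- for the subset pass, a `seen` set for the channel-dedup pass); equivalence is about the
-- RETURN value only (both Pythons mutate the argument dict in place in the same way).

-- shared boundary plumbing: the Python dicts as PySem.Dict, used by both ports
abbrev pvD := PySem.Dict String (PySem.Dict String (List String))

def pvWrap (cs : List (String × List (String × List String))) : pvD :=
  PySem.Dict.mk (cs.map (fun p => (p.1, PySem.Dict.mk p.2)))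

def pvUnwrap (d : pvD) : List (String × List (String × List String)) :=
  d.items.map (fun p => (p.1, p.2.items))

-- channel_servers[k]['channel_set']: Python raises KeyError when a key is absent;
-- Pre_ guarantees both keys are present, so the defaults are never read.
def pvCS (d : pvD) (k : String) : List String :=
  (d.getD k PySem.Dict.empty).getD "channel_set" []

-- x['channel_set'].remove(c) / .discard-style removal at key k (both ports call it on a
-- set that contains c, where Python's remove and discard coincide)
def pvRemoveChan (d : pvD) (k c : String) : pvD :=
  d.modify k PySem.Dict.empty (fun inner => inner.modify "channel_set" [] (fun s => PySem.Set.discard s c))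

-- ===== PORT A =====
-- first loop: pairwise subset elimination over snapshots, deleting in place
def pvA1 (d0 : pvD) : pvD :=
  d0.keys.foldl (fun d key =>
    if d.contains key then
      d.keys.foldl (fun d' other =>
        if (other != key && d'.contains other) then
          if PySem.Set.issubset (pvCS d' other) (pvCS d' key) then d'.erase other else d'
        else d') d
    else d) d0

-- second loop: for each server, each of its channels is removed from every other server
def pvA2 (d1 : pvD) : pvD :=
  d1.keys.foldl (fun d server =>
    (pvCS d server).foldl (fun d' channel =>
      d'.keys.foldl (fun d'' other =>
        if (other != server && PySem.Set.contains (pvCS d'' other) channel) then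
          pvRemoveChan d'' other channel
        else d'') d') d) d1

def eliminate_duplicate_servers (channel_servers : List (String × List (String × List String))) : List (String × List (String × List String)) :=
  pvUnwrap (pvA2 (pvA1 (pvWrap channel_servers)))

-- ===== PORT B =====
-- phase 1: one forward scan building the kept-key list
def pvB1 (d0 : pvD) : List String :=
  d0.keys.foldl (fun kept key =>
    if kept.any (fun j => PySem.Set.issubset (pvCS d0 key) (pvCS d0 j)) then kept
    else (kept.filter (fun j => ! PySem.Set.issubset (pvCS d0 j) (pvCS d0 key))) ++ [key]) []

-- del channel_servers[dead] for the keys not kept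
def pvBdel (d0 : pvD) (kept : List String) : pvD :=
  (d0.keys.filter (fun k => ! kept.contains k)).foldl (fun d k => d.erase k) d0

-- phase 2: one forward scan threading a `seen` set, removing from the server's own set
def pvB2 (d1 : pvD) : pvD :=
  (d1.keys.foldl (fun (st : pvD × PySem.Set String) server =>
    (pvCS st.1 server).foldl (fun st' channel =>
      if PySem.Set.contains st'.2 channel then (pvRemoveChan st'.1 server channel, st'.2)
      else (st'.1, PySem.Set.add st'.2 channel)) st) (d1, PySem.Set.empty)).1

def eliminate_duplicate_servers_alt (channel_servers : List (String × List (String × List String))) : List (String × List (String × List String)) :=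
  pvUnwrap (pvB2 (pvBdel (pvWrap channel_servers) (pvB1 (pvWrap channel_servers))))

-- ===== PRECONDITION & SPEC =====
-- Pre_ is dict/set well-formedness plus the 'channel_set' key: outer keys distinct (the
-- argument encodes a Python dict), every server dict contains 'channel_set' (otherwise
-- Python A raises KeyError), and its value has distinct elements (it encodes a set).
def Pre_eliminate_duplicate_servers (channel_servers : List (String × List (String × List String))) : Prop :=
  (channel_servers.map Prod.fst).Nodup ∧
  ∀ p ∈ channel_servers, (p.2.map Prod.fst).Nodup ∧
    (∃ q ∈ p.2, q.1 = "channel_set") ∧ (∀ q ∈ p.2, q.1 = "channel_set" → q.2.Nodup)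
instance (channel_servers : List (String × List (String × List String))) : Decidable (Pre_eliminate_duplicate_servers channel_servers) := by unfold Pre_eliminate_duplicate_servers; infer_instance

def pvWitness_eliminate_duplicate_servers : (List (String × List (String × List String))) :=
  [("irc1", [("channel_set", ["#a", "#b"])]), ("irc2", [("channel_set", ["#b", "#c"])])]

def Spec_eliminate_duplicate_servers (channel_servers : List (String × List (String × List String))) (out : List (String × List (String × List String))) : Prop := out = eliminate_duplicate_servers_alt channel_servers
instance (channel_servers : List (String × List (String × List String))) (out : List (String × List (String × List String))) : Decidable (Spec_eliminate_duplicate_servers channel_servers out) := by unfold Spec_eliminate_duplicate_servers; infer_instance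

-- ===== CLAIM (what is proved, stated in full; the proofs are below) =====
def Claim_equal_eliminate_duplicate_servers : Prop := ∀ (channel_servers : List (String × List (String × List String))), Dom_eliminate_duplicate_servers channel_servers → Pre_eliminate_duplicate_servers channel_servers → Spec_eliminate_duplicate_servers channel_servers (eliminate_duplicate_servers channel_servers)

-- ===== LEMMAS AND PROOFS =====

-- generic: find? over a filter that keeps all matches
theorem pv_find?_filter {α : Type} (l : List α) (p q : α → Bool) (h : ∀ x, p x = true → q x = true) :
    (l.filter q).find? p = l.find? p := by
  induction l with
  | nil => rfl
  | cons x xs ih =>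
    by_cases hp : p x = true
    · simp [List.filter_cons, h x hp, List.find?_cons, hp]
    · simp only [Bool.not_eq_true] at hp
      by_cases hq : q x = true
      · simp [List.filter_cons, hq, List.find?_cons, hp, ih]
      · simp only [Bool.not_eq_true] at hq
        simp [List.filter_cons, hq, List.find?_cons, hp, ih]

def pvF (d0 : pvD) (a : String → Bool) : pvD := PySem.Dict.mk (d0.items.filter (fun p => a p.1))

theorem pvF_keys (d0 : pvD) (a : String → Bool) : (pvF d0 a).keys = d0.keys.filter a := by
  simp [pvF, PySem.Dict.keys, List.filter_map, Function.comp_def]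

theorem pvF_contains (d0 : pvD) (a : String → Bool) (k : String) :
    (pvF d0 a).contains k = (d0.contains k && a k) := by
  simp only [pvF, PySem.Dict.contains, List.any_filter]
  induction d0.items with
  | nil => simp
  | cons x xs ih =>
    simp only [List.any_cons, ih]
    by_cases hx : x.1 = k
    · subst hx; simp [Bool.and_or_distrib_right]
    · have : (x.1 == k) = false := by simp [hx]
      simp [this]

theorem pvF_CS (d0 : pvD) (a : String → Bool) (k : String) (hk : a k = true) :
    pvCS (pvF d0 a) k = pvCS d0 k := by
  have : (pvF d0 a).get? k = d0.get? k := by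
    simp only [pvF, PySem.Dict.get?]
    rw [pv_find?_filter]
    intro x hx
    have : x.1 = k := by simpa using hx
    rw [this, hk]
  simp [pvCS, PySem.Dict.getD, this]

theorem pvF_erase (d0 : pvD) (a : String → Bool) (k : String) :
    (pvF d0 a).erase k = pvF d0 (fun s => a s && !(s == k)) := by
  simp only [pvF, PySem.Dict.erase, List.filter_filter]
  congr 1
  exact List.filter_congr (fun x _ => by rw [Bool.and_comm])

def pvSub (d0 : pvD) (x j : String) : Bool := PySem.Set.issubset (pvCS d0 x) (pvCS d0 j)

def pvAlive (sub : String → String → Bool) : List String → (String → Bool) → (String → Bool)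
  | [], a => a
  | k :: R, a => if a k then pvAlive sub R (fun s => a s && (s == k || ! sub s k)) else pvAlive sub R a

def pvKept (sub : String → String → Bool) : List String → List String → List String
  | [], kept => kept
  | k :: R, kept => if kept.any (fun j => sub k j) then pvKept sub R kept
      else pvKept sub R (kept.filter (fun j => ! sub j k) ++ [k])


theorem pvF_congr (d0 : pvD) (a a' : String → Bool) (h : ∀ p ∈ d0.items, a p.1 = a' p.1) :
    pvF d0 a = pvF d0 a' := by
  simp only [pvF]
  congr 1
  exact List.filter_congr h

-- the inner snapshot loop of A's first pass, on the filtered-dict abstraction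
theorem pvA1_inner (d0 : pvD) (key : String) :
    ∀ (ks : List String) (a : String → Bool), ks.Nodup → a key = true →
    (∀ x ∈ ks, a x = true ∧ d0.contains x = true) →
    ks.foldl (fun d' other =>
        if (other != key && d'.contains other) then
          if PySem.Set.issubset (pvCS d' other) (pvCS d' key) then d'.erase other else d'
        else d') (pvF d0 a)
      = pvF d0 (fun s => a s && !(ks.contains s && s != key && pvSub d0 s key)) := by
  intro ks
  induction ks with
  | nil =>
    intro a _ _ _
    simp only [List.foldl_nil]
    exact pvF_congr _ _ _ (fun p _ => by simp)
  | cons o ks ih =>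
    intro a hnd hak hall
    have hao : a o = true := (hall o (by simp)).1
    have hco : d0.contains o = true := (hall o (by simp)).2
    have hnd' : ks.Nodup := (List.nodup_cons.mp hnd).2
    have hno : o ∉ ks := (List.nodup_cons.mp hnd).1
    simp only [List.foldl_cons]
    by_cases hok : o = key
    · subst hok
      rw [show ((o != o && (pvF d0 a).contains o)) = false by simp]
      simp only [Bool.false_eq_true, if_false]
      rw [ih a hnd' hak (fun x hx => hall x (by simp [hx]))]
      refine pvF_congr _ _ _ (fun p _ => ?_)
      by_cases hxo : p.1 = o
      · rw [hxo]
        simp [show (o ∈ ks) = False by simp [hno]]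
      · simp [List.contains_cons, hxo, show (o == p.1) = false by simp [Ne.symm hxo]]
    · rw [show ((o != key && (pvF d0 a).contains o)) = true by
        simp [pvF_contains, hao, hco, hok]]
      simp only [if_true]
      rw [pvF_CS d0 a o hao, pvF_CS d0 a key hak]
      by_cases hsub : PySem.Set.issubset (pvCS d0 o) (pvCS d0 key) = true
      · rw [if_pos hsub, pvF_erase]
        rw [ih _ hnd' (by simp [hak, show (key == o) = false by simp [Ne.symm hok]])
            (fun x hx => ⟨by simp [(hall x (by simp [hx])).1,
                show (x == o) = false by simp; exact fun h => hno (h ▸ hx)],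
              (hall x (by simp [hx])).2⟩)]
        refine pvF_congr _ _ _ (fun p _ => ?_)
        by_cases hxo : p.1 = o
        · rw [hxo]
          simp [List.contains_cons, pvSub, hsub, show (o == key) = false by simp [hok]]
          exact fun _ => hok
        · simp [List.contains_cons, hxo, show (p.1 == o) = false by simp [hxo],
            show (o == p.1) = false by simp [Ne.symm hxo]]
      · rw [if_neg hsub]
        rw [ih a hnd' hak (fun x hx => hall x (by simp [hx]))]
        refine pvF_congr _ _ _ (fun p _ => ?_)
        by_cases hxo : p.1 = o
        · rw [hxo]
          simp [List.contains_cons, pvSub, hsub, show (o ∈ ks) = False by simp [hno]]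
        · simp [List.contains_cons, hxo, show (o == p.1) = false by simp [Ne.symm hxo]]

theorem pvA1_outer (d0 : pvD) (hnd : d0.keys.Nodup) :
    ∀ (R : List String) (a : String → Bool), (∀ k ∈ R, d0.contains k = true) →
    R.foldl (fun d key =>
      if d.contains key then
        d.keys.foldl (fun d' other =>
          if (other != key && d'.contains other) then
            if PySem.Set.issubset (pvCS d' other) (pvCS d' key) then d'.erase other else d'
          else d') d
      else d) (pvF d0 a)
    = pvF d0 (pvAlive (pvSub d0) R a) := by
  intro R
  induction R with
  | nil => intro a _; rfl
  | cons key R ih =>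
    intro a hR
    have hck : d0.contains key = true := hR key (by simp)
    simp only [List.foldl_cons, pvF_contains, hck, Bool.true_and, pvAlive]
    by_cases hak : a key = true
    · rw [if_pos hak, if_pos hak, pvF_keys]
      rw [pvA1_inner d0 key (d0.keys.filter a) a (hnd.filter a) hak
        (fun x hx => ⟨(List.mem_filter.mp hx).2, by
          rw [PySem.Dict.contains_iff_mem_keys]; exact (List.mem_filter.mp hx).1⟩)]
      rw [show pvF d0 (fun s => a s && !((d0.keys.filter a).contains s && s != key && pvSub d0 s key))
            = pvF d0 (fun s => a s && (s == key || ! pvSub d0 s key)) from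
        pvF_congr _ _ _ (fun p hp => by
          have hmem : p.1 ∈ d0.keys := List.mem_map.mpr ⟨p, hp, rfl⟩
          by_cases hap : a p.1 = true
          · by_cases hpk : p.1 = key
            · simp [hap, hmem, hpk]
            · simp [hap, hmem, hpk, bne]
          · simp [hap])]
      exact ih _ (fun k hk => hR k (by simp [hk]))
    · rw [if_neg hak, if_neg hak]
      exact ih a (fun k hk => hR k (by simp [hk]))

theorem pvSub_trans (d0 : pvD) (x y z : String) (h1 : pvSub d0 x y = true) (h2 : pvSub d0 y z = true) :
    pvSub d0 x z = true := by
  simp only [pvSub, PySem.Set.issubset, PySem.Set.contains, List.all_eq_true] at *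
  intro c hc
  have := h1 c hc
  simp only [List.contains_iff_mem] at this ⊢
  have := h2 c this
  simpa using this

theorem pv_alive_eq_kept (sub : String → String → Bool)
    (htrans : ∀ x y z, sub x y = true → sub y z = true → sub x z = true) :
    ∀ (R P : List String) (a : String → Bool) (kept : List String),
    (P ++ R).Nodup →
    (∀ x ∈ P, (a x = true ↔ x ∈ kept)) →
    (∀ x ∈ R, (a x = true ↔ ∀ j ∈ kept, sub x j = false)) →
    (∀ j ∈ kept, j ∈ P) →
    ∀ x, x ∈ P ++ R → (pvAlive sub R a x = true ↔ x ∈ pvKept sub R kept) := by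
  intro R
  induction R with
  | nil =>
    intro P a kept _ hP _ _ x hx
    simp only [List.append_nil] at hx
    exact hP x hx
  | cons k R ih =>
    intro P a kept hnd hP hR hkP
    have hkR : k ∉ R := by
      have := (List.nodup_append.mp hnd).2.1
      exact (List.nodup_cons.mp this).1
    have hkPmem : k ∉ P := by
      have := (List.nodup_append.mp hnd).2.2
      intro hk
      exact this k hk k (by simp) rfl
    have hnd' : ((P ++ [k]) ++ R).Nodup := by
      rw [List.append_assoc, List.singleton_append]
      exact hnd
    have hiff := hR k (by simp)
    by_cases hak : a k = true
    · -- A keeps k's turn; B appends k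
      have hnone : ∀ j ∈ kept, sub k j = false := hiff.mp hak
      have hany : (kept.any fun j => sub k j) = false := by
        simp only [List.any_eq_false]
        intro j hj
        simp [hnone j hj]
      simp only [pvAlive, pvKept, hak, if_true, hany, Bool.false_eq_true, if_false]
      intro x hx
      have hx' : x ∈ (P ++ [k]) ++ R := by
        rw [List.append_assoc, List.singleton_append]; exact hx
      refine ih (P ++ [k]) _ _ hnd' ?_ ?_ ?_ x hx'
      · -- processed prefix
        intro y hy
        rcases List.mem_append.mp hy with hyP | hyk
        · have hyk : y ≠ k := fun h => hkPmem (h ▸ hyP)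
          have : (y == k) = false := by simp [hyk]
          simp only [this, Bool.false_or, Bool.and_eq_true, hP y hyP]
          constructor
          · rintro ⟨hy1, hy2⟩
            refine List.mem_append.mpr (Or.inl ?_)
            refine List.mem_filter.mpr ⟨hy1, hy2⟩
          · intro hmem
            rcases List.mem_append.mp hmem with hf | hk1
            · exact ⟨(List.mem_filter.mp hf).1, (List.mem_filter.mp hf).2⟩
            · exact absurd (by simpa using hk1) hyk
        · have : y = k := by simpa using hyk
          subst this
          simp [hak]
      · -- remaining
        intro y hy
        have hyk : y ≠ k := fun h => hkR (h ▸ hy)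
        have hbk : (y == k) = false := by simp [hyk]
        simp only [hbk, Bool.false_or, Bool.and_eq_true, hR y (by simp [hy]),
          Bool.not_eq_eq_eq_not, Bool.not_true]
        constructor
        · rintro ⟨h1, h2⟩ j hj
          rcases List.mem_append.mp hj with hf | hk1
          · exact h1 j (List.mem_filter.mp hf).1
          · have : j = k := by simpa using hk1
            subst this; exact h2
        · intro hall
          have hxk : sub y k = false := hall k (by simp)
          refine ⟨fun j hj => ?_, hxk⟩
          by_cases hjk : sub j k = true
          · -- j was evicted; transitivity through k
            by_cases hyj : sub y j = true
            · exact absurd (htrans y j k hyj hjk) (by simp [hxk])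
            · simpa using hyj
          · exact hall j (List.mem_append.mpr (Or.inl (List.mem_filter.mpr ⟨hj, by simpa using hjk⟩)))
      · intro j hj
        rcases List.mem_append.mp hj with hf | hk1
        · exact List.mem_append.mpr (Or.inl (hkP j (List.mem_filter.mp hf).1))
        · exact List.mem_append.mpr (Or.inr hk1)
    · -- k is dropped in both
      have hex : (kept.any fun j => sub k j) = true := by
        by_contra hc
        have : ∀ j ∈ kept, sub k j = false := by
          simp only [Bool.not_eq_true, List.any_eq_false] at hc
          intro j hj; simpa using hc j hj
        exact hak (hiff.mpr this)
      simp only [pvAlive, pvKept, hak, Bool.false_eq_true, if_false, hex, if_true]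
      intro x hx
      have hx' : x ∈ (P ++ [k]) ++ R := by
        rw [List.append_assoc, List.singleton_append]; exact hx
      refine ih (P ++ [k]) a kept hnd' ?_ ?_ ?_ x hx'
      · intro y hy
        rcases List.mem_append.mp hy with hyP | hyk
        · exact hP y hyP
        · have : y = k := by simpa using hyk
          subst this
          constructor
          · intro h; exact absurd h hak
          · intro h; exact absurd (hkP _ h) hkPmem
      · intro y hy; exact hR y (by simp [hy])
      · intro j hj; exact List.mem_append.mpr (Or.inl (hkP j hj))


theorem pvF_true (d0 : pvD) : pvF d0 (fun _ => true) = d0 := by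
  apply PySem.Dict.ext
  simp [pvF]

theorem pvB1_fold (d0 : pvD) : ∀ (R : List String) (kept : List String),
    R.foldl (fun kept key =>
      if kept.any (fun j => PySem.Set.issubset (pvCS d0 key) (pvCS d0 j)) then kept
      else (kept.filter (fun j => ! PySem.Set.issubset (pvCS d0 j) (pvCS d0 key))) ++ [key]) kept
    = pvKept (pvSub d0) R kept := by
  intro R
  induction R with
  | nil => intro kept; rfl
  | cons k R ih =>
    intro kept
    simp only [List.foldl_cons, pvKept, pvSub]
    by_cases h : (kept.any fun j => PySem.Set.issubset (pvCS d0 k) (pvCS d0 j)) = true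
    · simp only [h, if_true, ih]
    · simp only [Bool.not_eq_true] at h
      simp only [h, Bool.false_eq_true, if_false, ih]

theorem pvB1_eq_kept (d0 : pvD) : pvB1 d0 = pvKept (pvSub d0) d0.keys [] :=
  pvB1_fold d0 d0.keys []

theorem pv_foldl_erase (ks : List String) : ∀ (d : pvD),
    ks.foldl (fun d k => d.erase k) d = PySem.Dict.mk (d.items.filter (fun p => ! ks.contains p.1)) := by
  induction ks with
  | nil =>
    intro d
    apply PySem.Dict.ext
    simp
  | cons k ks ih =>
    intro d
    simp only [List.foldl_cons, ih]
    apply PySem.Dict.ext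
    simp only [PySem.Dict.erase, List.filter_filter]
    refine List.filter_congr (fun p _ => ?_)
    simp only [List.contains_cons]
    by_cases hpk : p.1 = k
    · simp [hpk]
    · simp [show (p.1 == k) = false by simp [hpk]]

theorem pvBdel_eq (d0 : pvD) (kept : List String) :
    pvBdel d0 kept = pvF d0 (fun s => kept.contains s) := by
  unfold pvBdel
  rw [pv_foldl_erase]
  refine PySem.Dict.ext ?_
  show List.filter _ _ = List.filter _ _
  refine List.filter_congr (fun p hp => ?_)
  show (!(d0.keys.filter (fun k => ! kept.contains k)).contains p.1) = kept.contains p.1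
  have hmem : p.1 ∈ d0.keys := List.mem_map.mpr ⟨p, hp, rfl⟩
  by_cases h : kept.contains p.1 = true
  · rw [h]
    have hnotmem : p.1 ∉ (d0.keys.filter (fun k => ! kept.contains k)) := by
      intro hc
      have := (List.mem_filter.mp hc).2
      rw [h] at this
      simp at this
    have : (d0.keys.filter (fun k => ! kept.contains k)).contains p.1 = false := by
      rw [Bool.eq_false_iff]
      simpa [List.contains_iff_mem] using hnotmem
    rw [this]
    rfl
  · simp only [Bool.not_eq_true] at h
    rw [h]
    have hmemf : p.1 ∈ (d0.keys.filter (fun k => ! kept.contains k)) :=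
      List.mem_filter.mpr ⟨hmem, by rw [h]; rfl⟩
    have : (d0.keys.filter (fun k => ! kept.contains k)).contains p.1 = true := by
      simpa [List.contains_iff_mem] using hmemf
    rw [this]
    rfl

theorem pv_phase1 (d0 : pvD) (hnd : d0.keys.Nodup) : pvA1 d0 = pvBdel d0 (pvB1 d0) := by
  have hA : pvA1 d0 = pvF d0 (pvAlive (pvSub d0) d0.keys (fun _ => true)) := by
    have h2 := pvA1_outer d0 hnd d0.keys (fun _ => true)
      (fun k hk => (PySem.Dict.contains_iff_mem_keys _ _).mpr hk)
    rw [pvF_true] at h2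
    exact h2
  rw [hA, pvB1_eq_kept, pvBdel_eq]
  have hmain := pv_alive_eq_kept (pvSub d0) (pvSub_trans d0) d0.keys [] (fun _ => true) []
    (by simpa using hnd) (by simp) (by simp) (by simp)
  refine pvF_congr _ _ _ (fun p hp => ?_)
  have hmem : p.1 ∈ d0.keys := List.mem_map.mpr ⟨p, hp, rfl⟩
  have h := hmain p.1 (by simpa using hmem)
  by_cases hm : p.1 ∈ pvKept (pvSub d0) d0.keys []
  · have hc : (pvKept (pvSub d0) d0.keys []).contains p.1 = true := by
      simpa [List.contains_iff_mem] using hm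
    rw [h.mpr hm, hc]
  · have ha : pvAlive (pvSub d0) d0.keys (fun _ => true) p.1 = false := by
      rw [Bool.eq_false_iff]
      exact fun hc => hm (h.mp hc)
    have hc : (pvKept (pvSub d0) d0.keys []).contains p.1 = false := by
      rw [Bool.eq_false_iff]
      simpa [List.contains_iff_mem] using hm
    rw [ha, hc]


-- ===== phase 2 machinery =====

def pvSetCS (v : PySem.Dict String (List String)) (X : List String) : PySem.Dict String (List String) :=
  PySem.Dict.mk (v.items.map (fun q => if q.1 == "channel_set" then ("channel_set", X) else q))

def pvG (d1 : pvD) (cur : String → List String) : pvD :=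
  PySem.Dict.mk (d1.items.map (fun p => (p.1, pvSetCS p.2 (cur p.1))))

def pvFinal (S1 : String → List String) : List String → (String → Bool) → (String → List String) → (String → List String)
  | [], _, acc => acc
  | k :: R, u, acc => pvFinal S1 R (fun c => u c || (S1 k).contains c)
      (fun s => if s == k then (S1 k).filter (fun c => ! u c) else acc s)

theorem pv_contains_filter {α : Type} [BEq α] [LawfulBEq α] (l : List α) (q : α → Bool) (x : α) :
    (l.filter q).contains x = (l.contains x && q x) := by
  induction l with
  | nil => simp
  | cons a l ih =>
    by_cases hq : q a = true
    · simp only [List.filter_cons, hq, if_true, List.contains_cons, ih]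
      by_cases hxa : x = a
      · subst hxa; simp [hq]
      · simp [show (x == a) = false by simp [hxa]]
    · simp only [Bool.not_eq_true] at hq
      simp only [List.filter_cons, hq, Bool.false_eq_true, if_false, List.contains_cons, ih]
      by_cases hxa : x = a
      · subst hxa; simp [hq]
      · simp [show (x == a) = false by simp [hxa]]

theorem pv_contains_add (s : PySem.Set String) (c x : String) :
    (PySem.Set.add s c).contains x = (s.contains x || x == c) := by
  rw [Bool.eq_iff_iff]
  simp only [PySem.Set.add, PySem.Set.contains, Bool.or_eq_true, List.contains_iff_mem, beq_iff_eq]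
  by_cases hc : c ∈ s
  · rw [if_pos hc]
    exact ⟨Or.inl, fun hx => hx.elim id (fun he => he ▸ hc)⟩
  · rw [if_neg hc]
    simp [List.mem_append]

theorem pv_contains_update (l : List String) : ∀ (s : PySem.Set String) (x : String),
    (PySem.Set.update s l).contains x = (s.contains x || l.contains x) := by
  induction l with
  | nil => intro s x; simp [PySem.Set.update]
  | cons c l ih =>
    intro s x
    show (PySem.Set.update (PySem.Set.add s c) l).contains x = _
    rw [ih, pv_contains_add]
    simp only [List.contains_cons, PySem.Set.contains, List.contains_iff_mem, beq_eq_decide]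
    ac_rfl

theorem pv_discard_notmem (s : PySem.Set String) (c : String) (h : s.contains c = false) :
    PySem.Set.discard s c = s := by
  simp only [PySem.Set.discard]
  refine List.filter_eq_self.mpr (fun y hy => ?_)
  have : ¬ y = c := fun he => by
    subst he
    have hc : PySem.Set.contains s y = true := by
      simpa [PySem.Set.contains, List.contains_iff_mem] using hy
    rw [h] at hc
    exact absurd hc (by decide)
  simp [this]

theorem pvG_keys (d1 : pvD) (cur : String → List String) : (pvG d1 cur).keys = d1.keys := by
  simp [pvG, PySem.Dict.keys]

theorem pvG_congr (d1 : pvD) (cur cur' : String → List String)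
    (h : ∀ k ∈ d1.keys, cur k = cur' k) : pvG d1 cur = pvG d1 cur' := by
  apply PySem.Dict.ext
  show List.map _ _ = List.map _ _
  refine List.map_congr_left (fun p hp => ?_)
  rw [h p.1 (List.mem_map.mpr ⟨p, hp, rfl⟩)]

theorem pv_findCS (X : List String) : ∀ (l : List (String × List String)),
    (∃ q ∈ l, q.1 = "channel_set") →
    (l.map (fun q => if q.1 == "channel_set" then ("channel_set", X) else q)).find?
        (fun p => p.1 == "channel_set") = some ("channel_set", X) := by
  intro l
  induction l with
  | nil => rintro ⟨q, hq, _⟩; simp at hq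
  | cons a l ih =>
    rintro ⟨q, hq, hq1⟩
    by_cases ha : a.1 = "channel_set"
    · simp [List.find?_cons, ha]
    · have hne : (a.1 == "channel_set") = false := by simp [ha]
      simp only [List.map_cons, hne, Bool.false_eq_true, if_false, List.find?_cons, hne]
      rcases List.mem_cons.mp hq with h1 | h1
      · exact absurd (h1 ▸ hq1) ha
      · exact ih ⟨q, h1, hq1⟩

theorem pvSetCS_getD (v : PySem.Dict String (List String)) (X : List String)
    (h : v.contains "channel_set" = true) : (pvSetCS v X).getD "channel_set" [] = X := by
  have hex : ∃ q ∈ v.items, q.1 = "channel_set" := by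
    simp only [PySem.Dict.contains, List.any_eq_true] at h
    obtain ⟨q, hq, hq1⟩ := h
    exact ⟨q, hq, by simpa using hq1⟩
  simp only [pvSetCS, PySem.Dict.getD, PySem.Dict.get?]
  rw [pv_findCS X v.items hex]
  rfl

theorem pvSetCS_contains (v : PySem.Dict String (List String)) (X : List String) :
    (pvSetCS v X).contains "channel_set" = v.contains "channel_set" := by
  simp only [pvSetCS, PySem.Dict.contains, List.any_map]
  have : ((fun p : String × List String => p.1 == "channel_set") ∘
      (fun q : String × List String => if q.1 == "channel_set" then ("channel_set", X) else q))
      = (fun p : String × List String => p.1 == "channel_set") := by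
    funext q
    by_cases hq : q.1 = "channel_set"
    · simp [Function.comp, hq]
    · simp [Function.comp, show (q.1 == "channel_set") = false by simp [hq], hq]
  rw [this]


theorem pv_find?_map_key {β γ : Type} (l : List (String × β)) (g : String × β → String × γ)
    (hg : ∀ p, (g p).1 = p.1) (k : String) :
    (l.map g).find? (fun p => p.1 == k) = (l.find? (fun p => p.1 == k)).map g := by
  induction l with
  | nil => rfl
  | cons a l ih =>
    simp only [List.map_cons, List.find?_cons]
    by_cases ha : a.1 = k
    · have h1 : ((g a).1 == k) = true := by simp [hg, ha]
      have h2 : (a.1 == k) = true := by simp [ha]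
      simp [h1, h2]
    · have h1 : ((g a).1 == k) = false := by simp [hg, ha]
      have h2 : (a.1 == k) = false := by simp [ha]
      simp [h1, h2, ih]

theorem pvCS_not (d : pvD) (k : String) (hk : k ∉ d.keys) : pvCS d k = [] := by
  have : d.items.find? (fun p => p.1 == k) = none := by
    rw [List.find?_eq_none]
    intro p hp
    simp only [beq_iff_eq]
    exact fun he => hk (he ▸ List.mem_map.mpr ⟨p, hp, rfl⟩)
  simp [pvCS, PySem.Dict.getD, PySem.Dict.get?, this, PySem.Dict.empty]

theorem pvG_find (d1 : pvD) (cur : String → List String) (k : String) (hk : k ∈ d1.keys) :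
    ∃ q ∈ d1.items, q.1 = k ∧
      (pvG d1 cur).get? k = some (pvSetCS q.2 (cur k)) := by
  obtain ⟨p, hp, hpk⟩ := List.mem_map.mp hk
  have hsome : (d1.items.find? (fun p => p.1 == k)).isSome := by
    rw [List.find?_isSome]
    exact ⟨p, hp, by simp [hpk]⟩
  obtain ⟨q, hq⟩ := Option.isSome_iff_exists.mp hsome
  have hqk : q.1 = k := by simpa using List.find?_some hq
  refine ⟨q, List.mem_of_find?_eq_some hq, hqk, ?_⟩
  have hmap : (pvG d1 cur).items = d1.items.map (fun p => (p.1, pvSetCS p.2 (cur p.1))) := rfl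
  simp only [PySem.Dict.get?, hmap]
  rw [pv_find?_map_key d1.items (fun p => (p.1, pvSetCS p.2 (cur p.1))) (fun p => rfl) k, hq]
  simp [hqk]

theorem pvG_CS (d1 : pvD) (cur : String → List String)
    (hHas : ∀ p ∈ d1.items, p.2.contains "channel_set" = true)
    (k : String) (hk : k ∈ d1.keys) : pvCS (pvG d1 cur) k = cur k := by
  obtain ⟨q, hq, _, hget⟩ := pvG_find d1 cur k hk
  simp only [pvCS, PySem.Dict.getD, hget, Option.getD_some]
  exact pvSetCS_getD _ _ (hHas q hq)

theorem pvSetCS_self (v : PySem.Dict String (List String)) (hnd : v.keys.Nodup) :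
    pvSetCS v (v.getD "channel_set" []) = v := by
  apply PySem.Dict.ext
  show List.map _ _ = _
  conv_rhs => rw [← List.map_id v.items]
  refine List.map_congr_left (fun q hq => ?_)
  by_cases hcs : q.1 = "channel_set"
  · have hmem : ("channel_set", q.2) ∈ v.items := by
      rw [← hcs]
      simpa using hq
    have := PySem.Dict.getD_of_mem_items v hmem hnd ([] : List String)
    simp only [show (q.1 == "channel_set") = true by simp [hcs], if_true, this, id]
    exact Prod.ext (by simp [hcs]) rfl
  · simp [show (q.1 == "channel_set") = false by simp [hcs]]

theorem pvG_self (d1 : pvD) (hnd : d1.keys.Nodup)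
    (hInnd : ∀ p ∈ d1.items, p.2.keys.Nodup) : pvG d1 (pvCS d1) = d1 := by
  apply PySem.Dict.ext
  show List.map _ _ = _
  conv_rhs => rw [← List.map_id d1.items]
  refine List.map_congr_left (fun p hp => ?_)
  have hmem : (p.1, p.2) ∈ d1.items := by simpa using hp
  have hget := PySem.Dict.getD_of_mem_items d1 hmem hnd (PySem.Dict.empty : PySem.Dict String (List String))
  have hcs : pvCS d1 p.1 = p.2.getD "channel_set" [] := by
    simp [pvCS, hget]
  rw [hcs]
  simp only [id]
  exact Prod.ext rfl (by simp [pvSetCS_self p.2 (hInnd p hp)])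


theorem pvSetCS_insert (v : PySem.Dict String (List String)) (X Y : List String)
    (h : v.contains "channel_set" = true) :
    (pvSetCS v X).insert "channel_set" Y = pvSetCS v Y := by
  have hc : (pvSetCS v X).contains "channel_set" = true := by
    rw [pvSetCS_contains]; exact h
  apply PySem.Dict.ext
  simp only [PySem.Dict.insert, hc, if_true]
  show List.map _ (List.map _ _) = List.map _ _
  rw [List.map_map]
  refine List.map_congr_left (fun q _ => ?_)
  by_cases hq : q.1 = "channel_set"
  · simp [Function.comp, hq]
  · simp [Function.comp, show (q.1 == "channel_set") = false by simp [hq]]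

theorem pvG_contains (d1 : pvD) (cur : String → List String) (k : String) :
    (pvG d1 cur).contains k = d1.contains k := by
  by_cases h : k ∈ d1.keys
  · have h1 : (pvG d1 cur).contains k = true := by
      rw [PySem.Dict.contains_iff_mem_keys, pvG_keys]; exact h
    have h2 : d1.contains k = true := by
      rw [PySem.Dict.contains_iff_mem_keys]; exact h
    rw [h1, h2]
  · have h1 : (pvG d1 cur).contains k = false := by
      rw [Bool.eq_false_iff]
      intro hc
      exact h (by rw [← pvG_keys d1 cur]; exact (PySem.Dict.contains_iff_mem_keys _ _).mp hc)
    have h2 : d1.contains k = false := by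
      rw [Bool.eq_false_iff]
      intro hc
      exact h ((PySem.Dict.contains_iff_mem_keys _ _).mp hc)
    rw [h1, h2]

theorem pvRemoveChan_G (d1 : pvD) (hnd : d1.keys.Nodup)
    (hHas : ∀ p ∈ d1.items, p.2.contains "channel_set" = true)
    (cur : String → List String) (k : String) (hk : k ∈ d1.keys) (c : String) :
    pvRemoveChan (pvG d1 cur) k c
      = pvG d1 (fun s => if s == k then PySem.Set.discard (cur k) c else cur s) := by
  obtain ⟨q, hq, hqk, hget⟩ := pvG_find d1 cur k hk
  have hgetD : (pvG d1 cur).getD k PySem.Dict.empty = pvSetCS q.2 (cur k) := by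
    simp [PySem.Dict.getD, hget]
  simp only [pvRemoveChan, PySem.Dict.modify]
  rw [hgetD]
  rw [pvSetCS_getD q.2 (cur k) (hHas q hq), pvSetCS_insert q.2 (cur k) _ (hHas q hq)]
  have hcont : (pvG d1 cur).contains k = true := by
    rw [pvG_contains, PySem.Dict.contains_iff_mem_keys]
    exact hk
  apply PySem.Dict.ext
  simp only [PySem.Dict.insert, hcont, if_true]
  show List.map _ (List.map _ _) = List.map _ _
  rw [List.map_map]
  refine List.map_congr_left (fun p hp => ?_)
  by_cases hpk : p.1 = k
  · have hpq : p.2 = q.2 := by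
      have h1 := PySem.Dict.get?_of_mem_items d1 (k := p.1) (v := p.2) (by simpa using hp) hnd
      have h2 := PySem.Dict.get?_of_mem_items d1 (k := q.1) (v := q.2) (by simpa using hq) hnd
      rw [hpk] at h1
      rw [hqk] at h2
      rw [h1] at h2
      exact (Option.some.injEq _ _ ▸ h2).symm ▸ rfl
    simp only [Function.comp, show (p.1 == k) = true by simp [hpk], if_true, hpk]
    rw [hpq]
    simp
  · simp [Function.comp, show (p.1 == k) = false by simp [hpk], hpk]


theorem pv_notmem_of_contains_false (s : PySem.Set String) (c : String)
    (h : PySem.Set.contains s c = false) : c ∉ s := by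
  intro hc
  have htrue : PySem.Set.contains s c = true := by
    simpa [PySem.Set.contains, List.contains_iff_mem] using hc
  rw [h] at htrue
  exact absurd htrue (by decide)

-- A's innermost loop: one channel removed from every other server
theorem pvA2_remove (d1 : pvD) (hnd : d1.keys.Nodup)
    (hHas : ∀ p ∈ d1.items, p.2.contains "channel_set" = true) (server c : String) :
    ∀ (ks : List String) (cur : String → List String), ks.Nodup → (∀ x ∈ ks, x ∈ d1.keys) →
    ks.foldl (fun d'' other =>
        if (other != server && PySem.Set.contains (pvCS d'' other) c) then
          pvRemoveChan d'' other c
        else d'') (pvG d1 cur)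
      = pvG d1 (fun s => if ks.contains s && s != server then PySem.Set.discard (cur s) c else cur s) := by
  intro ks
  induction ks with
  | nil =>
    intro cur _ _
    simp only [List.foldl_nil]
    refine pvG_congr _ _ _ (fun k _ => ?_)
    simp
  | cons o ks ih =>
    intro cur hndk hsub
    have hok : o ∈ d1.keys := hsub o (by simp)
    have hno : o ∉ ks := (List.nodup_cons.mp hndk).1
    have hnd' : ks.Nodup := (List.nodup_cons.mp hndk).2
    simp only [List.foldl_cons]
    rw [pvG_CS d1 cur hHas o hok]
    by_cases hos : o = server
    · rw [show ((o != server && PySem.Set.contains (cur o) c)) = false by simp [hos]]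
      simp only [Bool.false_eq_true, if_false]
      rw [ih cur hnd' (fun x hx => hsub x (by simp [hx]))]
      refine pvG_congr _ _ _ (fun k _ => ?_)
      by_cases hko : k = o
      · subst hko
        simp [List.contains_cons, hos, hno]
      · simp [List.contains_cons, hko, show (k == o) = false by simp [hko]]
    · by_cases hin : PySem.Set.contains (cur o) c = true
      · rw [show ((o != server && PySem.Set.contains (cur o) c)) = true by
          simp only [Bool.and_eq_true, hin, and_true, bne_iff_ne, ne_eq]
          exact hos]
        simp only [if_true]
        rw [pvRemoveChan_G d1 hnd hHas cur o hok c]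
        rw [ih _ hnd' (fun x hx => hsub x (by simp [hx]))]
        refine pvG_congr _ _ _ (fun k _ => ?_)
        by_cases hko : k = o
        · subst hko
          have : (ks.contains k) = false := by
            rw [Bool.eq_false_iff]
            simpa [List.contains_iff_mem] using hno
          simp [List.contains_cons, this, hos]
          exact fun h => absurd h hno
        · simp [List.contains_cons, hko, show (k == o) = false by simp [hko]]
      · simp only [Bool.not_eq_true] at hin
        rw [show ((o != server && PySem.Set.contains (cur o) c)) = false by
          simp only [hin, Bool.and_false]]
        simp only [Bool.false_eq_true, if_false]
        rw [ih cur hnd' (fun x hx => hsub x (by simp [hx]))]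
        refine pvG_congr _ _ _ (fun k _ => ?_)
        by_cases hko : k = o
        · subst hko
          simp [List.contains_cons, hno, pv_discard_notmem (cur k) c hin]
        · simp [List.contains_cons, hko, show (k == o) = false by simp [hko]]

-- A's middle loop: every channel of the server's snapshot is removed from all other servers
theorem pvA2_chanfold (d1 : pvD) (hnd : d1.keys.Nodup)
    (hHas : ∀ p ∈ d1.items, p.2.contains "channel_set" = true) (server : String) :
    ∀ (csl : List String) (cur : String → List String),
    csl.foldl (fun d' channel =>
      d'.keys.foldl (fun d'' other =>
        if (other != server && PySem.Set.contains (pvCS d'' other) channel) then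
          pvRemoveChan d'' other channel
        else d'') d') (pvG d1 cur)
    = pvG d1 (fun s => if s == server then cur s
        else (cur s).filter (fun y => ! csl.contains y)) := by
  intro csl
  induction csl with
  | nil =>
    intro cur
    simp only [List.foldl_nil]
    refine pvG_congr _ _ _ (fun k _ => ?_)
    by_cases hks : k = server
    · simp [hks]
    · simp [hks]
  | cons c csl ih =>
    intro cur
    simp only [List.foldl_cons]
    rw [show (pvG d1 cur).keys = d1.keys from pvG_keys d1 cur]
    rw [pvA2_remove d1 hnd hHas server c d1.keys cur hnd (fun x hx => hx)]
    rw [ih _]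
    refine pvG_congr _ _ _ (fun k hk => ?_)
    have hkc : d1.keys.contains k = true := by simpa [List.contains_iff_mem] using hk
    by_cases hks : k = server
    · simp [hks]
    · have hne : (k == server) = false := by simp [hks]
      simp only [hne, Bool.false_eq_true, if_false, hkc, Bool.true_and,
        show (k != server) = true by simp [hks], Bool.and_true, if_true]
      rw [show PySem.Set.discard (cur k) c = (cur k).filter (fun y => ! y == c) from rfl]
      rw [List.filter_filter]
      refine List.filter_congr (fun y _ => ?_)
      simp only [List.contains_cons]
      by_cases hyc : y = c
      · subst hyc; simp
      · simp [show (y == c) = false by simp [hyc]]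


theorem pvFinal_congr (S1 : String → List String) : ∀ (R : List String) (u : String → Bool)
    (acc acc' : String → List String), (∀ s, s ∉ R → acc s = acc' s) →
    pvFinal S1 R u acc = pvFinal S1 R u acc' := by
  intro R
  induction R with
  | nil =>
    intro u acc acc' h
    exact funext (fun s => h s (by simp))
  | cons k R ih =>
    intro u acc acc' h
    simp only [pvFinal]
    refine ih _ _ _ (fun s hs => ?_)
    by_cases hsk : s = k
    · simp [hsk]
    · have : s ∉ k :: R := by simp [hsk, hs]
      simp [show (s == k) = false by simp [hsk], h s this]

-- A's outer loop over the remaining servers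
theorem pvA2_main (d1 : pvD) (hnd : d1.keys.Nodup)
    (hHas : ∀ p ∈ d1.items, p.2.contains "channel_set" = true) :
    ∀ (R : List String) (cur : String → List String) (u : String → Bool), R.Nodup →
    (∀ x ∈ R, x ∈ d1.keys) →
    (∀ s ∈ R, cur s = (pvCS d1 s).filter (fun c => ! u c)) →
    (∀ s, s ∉ R → ∀ c ∈ cur s, u c = true) →
    R.foldl (fun d server =>
      (pvCS d server).foldl (fun d' channel =>
        d'.keys.foldl (fun d'' other =>
          if (other != server && PySem.Set.contains (pvCS d'' other) channel) then
            pvRemoveChan d'' other channel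
          else d'') d') d) (pvG d1 cur)
    = pvG d1 (pvFinal (pvCS d1) R u cur) := by
  intro R
  induction R with
  | nil => intro cur u _ _ _ _; rfl
  | cons server R ih =>
    intro cur u hndR hsub h1 h2
    have hsk : server ∈ d1.keys := hsub server (by simp)
    have hnoR : server ∉ R := (List.nodup_cons.mp hndR).1
    have hndR' : R.Nodup := (List.nodup_cons.mp hndR).2
    simp only [List.foldl_cons]
    rw [pvG_CS d1 cur hHas server hsk]
    rw [pvA2_chanfold d1 hnd hHas server (cur server) cur]
    -- the updated assignment after processing `server`
    set u' : String → Bool := fun c => u c || (pvCS d1 server).contains c with hu'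
    set cur₁ : String → List String := fun s => if s == server then cur s
        else (cur s).filter (fun y => ! (cur server).contains y) with hcur₁
    rw [ih cur₁ u' hndR' (fun x hx => hsub x (by simp [hx])) ?h1 ?h2]
    case h1 =>
      intro s hs
      have hss : s ≠ server := fun he => hnoR (he ▸ hs)
      simp only [hcur₁, show (s == server) = false by simp [hss], Bool.false_eq_true, if_false]
      rw [h1 s (by simp [hs]), List.filter_filter]
      refine List.filter_congr (fun y _ => ?_)
      rw [h1 server (by simp)]
      rw [pv_contains_filter]
      simp only [hu']
      by_cases hy : u y = true
      · simp [hy]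
      · simp only [Bool.not_eq_true] at hy
        simp [hy]
    case h2 =>
      intro s hs c hc
      by_cases hss : s = server
      · subst hss
        simp only [hcur₁, show (s == s) = true by simp] at hc
        rw [h1 s (by simp)] at hc
        simp only [hu']
        have : c ∈ pvCS d1 s := (List.mem_filter.mp hc).1
        simp [List.contains_iff_mem, this]
      · have hsR : s ∉ R := fun hx => hs (by simp [hx])
        have hsRc : s ∉ server :: R := by simp [hss, hsR]
        simp only [hcur₁, show (s == server) = false by simp [hss], Bool.false_eq_true, if_false] at hc
        have := h2 s hsRc c (List.mem_filter.mp hc).1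
        simp [hu', this]
    -- both sides are pvFinal with acc functions agreeing off R
    show pvG d1 (pvFinal (pvCS d1) R u' cur₁) = pvG d1 (pvFinal (pvCS d1) (server :: R) u cur)
    simp only [pvFinal]
    rw [pvFinal_congr (pvCS d1) R u' cur₁
      (fun s => if s == server then (pvCS d1 server).filter (fun c => ! u c) else cur s) ?hacc]
    case hacc =>
      intro s hs
      by_cases hss : s = server
      · simp only [hcur₁, hss, show (server == server) = true by simp, if_true]
        exact h1 server (by simp)
      · have hsRc : s ∉ server :: R := by simp [hss, hs]
        simp only [hcur₁, show (s == server) = false by simp [hss], Bool.false_eq_true, if_false]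
        refine List.filter_eq_self.mpr (fun y hy => ?_)
        have hu := h2 s hsRc y hy
        rw [h1 server (by simp), pv_contains_filter]
        simp [hu]


theorem pv_mem_of_contains (s : PySem.Set String) {c : String}
    (h : PySem.Set.contains s c = true) : c ∈ s := by
  simpa [PySem.Set.contains, List.contains_iff_mem] using h

-- B's inner loop over the snapshot of the server's own set
theorem pvB2_inner (d1 : pvD) (hnd : d1.keys.Nodup)
    (hHas : ∀ p ∈ d1.items, p.2.contains "channel_set" = true)
    (server : String) (hsk : server ∈ d1.keys) :
    ∀ (csl : List String) (cur : String → List String) (seen : PySem.Set String), csl.Nodup →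
    csl.foldl (fun st' channel =>
        if PySem.Set.contains st'.2 channel then (pvRemoveChan st'.1 server channel, st'.2)
        else (st'.1, PySem.Set.add st'.2 channel)) (pvG d1 cur, seen)
      = (pvG d1 (fun s => if s == server
            then (cur server).filter (fun y => ! (csl.contains y && seen.contains y)) else cur s),
         PySem.Set.update seen (csl.filter (fun c => ! seen.contains c))) := by
  intro csl
  induction csl with
  | nil =>
    intro cur seen _
    simp only [List.foldl_nil, List.filter_nil]
    rw [Prod.mk.injEq]
    refine ⟨?_, rfl⟩
    refine pvG_congr _ _ _ (fun k _ => ?_)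
    by_cases hks : k = server
    · simp [hks]
    · simp [hks]
  | cons c csl ih =>
    intro cur seen hndc
    have hnoc : c ∉ csl := (List.nodup_cons.mp hndc).1
    have hndc' : csl.Nodup := (List.nodup_cons.mp hndc).2
    simp only [List.foldl_cons]
    by_cases hc : PySem.Set.contains seen c = true
    · rw [if_pos hc]
      rw [pvRemoveChan_G d1 hnd hHas cur server hsk c]
      rw [ih _ seen hndc']
      rw [Prod.mk.injEq]
      refine ⟨?_, ?_⟩
      · refine pvG_congr _ _ _ (fun k _ => ?_)
        by_cases hks : k = server
        · simp only [hks, show (server == server) = true by simp, if_true]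
          rw [show PySem.Set.discard (cur server) c = (cur server).filter (fun y => ! y == c) from rfl]
          rw [List.filter_filter]
          refine List.filter_congr (fun y _ => ?_)
          simp only [List.contains_cons]
          by_cases hyc : y = c
          · subst hyc; simp [hc, pv_mem_of_contains seen hc]
          · simp [show (y == c) = false by simp [hyc]]
        · simp [show (k == server) = false by simp [hks], hks]
      · congr 1
        simp [List.filter_cons, hc, pv_mem_of_contains seen hc]
    · simp only [Bool.not_eq_true] at hc
      rw [if_neg (by rw [hc]; exact Bool.false_ne_true)]
      rw [ih cur (PySem.Set.add seen c) hndc']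
      rw [Prod.mk.injEq]
      refine ⟨?_, ?_⟩
      · refine pvG_congr _ _ _ (fun k _ => ?_)
        by_cases hks : k = server
        · simp only [hks, show (server == server) = true by simp, if_true]
          refine List.filter_congr (fun y _ => ?_)
          rw [pv_contains_add]
          simp only [List.contains_cons]
          by_cases hyc : y = c
          · subst hyc
            have hcf : csl.contains y = false := by
              rw [Bool.eq_false_iff]
              simpa [List.contains_iff_mem] using hnoc
            simp only [hcf, hc, Bool.false_and, Bool.and_false, Bool.not_false, Bool.and_true]
            try simp [pv_notmem_of_contains_false csl y hcf, pv_notmem_of_contains_false seen y hc]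
          · simp [show (y == c) = false by simp [hyc]]
        · simp [show (k == server) = false by simp [hks], hks]
      · rw [show ((c :: csl).filter (fun x => ! PySem.Set.contains seen x))
            = c :: csl.filter (fun x => ! PySem.Set.contains seen x) by
          simp [List.filter_cons, hc, pv_notmem_of_contains_false seen c hc]]
        rw [show PySem.Set.update seen (c :: csl.filter (fun x => ! PySem.Set.contains seen x))
            = PySem.Set.update (PySem.Set.add seen c) (csl.filter (fun x => ! PySem.Set.contains seen x)) from rfl]
        congr 1
        refine List.filter_congr (fun y hy => ?_)
        rw [pv_contains_add]
        have hyc : (y == c) = false := by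
          simp only [beq_eq_false_iff_ne, ne_eq]
          exact fun he => hnoc (he ▸ hy)
        simp [hyc]


-- B's outer loop over the remaining servers
theorem pvB2_main (d1 : pvD) (hnd : d1.keys.Nodup)
    (hHas : ∀ p ∈ d1.items, p.2.contains "channel_set" = true)
    (hS1nd : ∀ s, (pvCS d1 s).Nodup) :
    ∀ (R : List String) (cur : String → List String) (seen : PySem.Set String) (u : String → Bool),
    R.Nodup → (∀ x ∈ R, x ∈ d1.keys) →
    (∀ s ∈ R, cur s = pvCS d1 s) →
    (∀ c, seen.contains c = u c) →
    (R.foldl (fun st server =>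
      (pvCS st.1 server).foldl (fun st' channel =>
        if PySem.Set.contains st'.2 channel then (pvRemoveChan st'.1 server channel, st'.2)
        else (st'.1, PySem.Set.add st'.2 channel)) st) (pvG d1 cur, seen)).1
    = pvG d1 (pvFinal (pvCS d1) R u cur) := by
  intro R
  induction R with
  | nil => intro cur seen u _ _ _ _; rfl
  | cons server R ih =>
    intro cur seen u hndR hsub h3 h4
    have hsk : server ∈ d1.keys := hsub server (by simp)
    have hnoR : server ∉ R := (List.nodup_cons.mp hndR).1
    have hndR' : R.Nodup := (List.nodup_cons.mp hndR).2
    simp only [List.foldl_cons]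
    rw [show pvCS (pvG d1 cur, seen).1 server = cur server from pvG_CS d1 cur hHas server hsk]
    rw [h3 server (by simp)]
    rw [pvB2_inner d1 hnd hHas server hsk (pvCS d1 server) cur seen (hS1nd server)]
    rw [ih _ _ (fun c => u c || (pvCS d1 server).contains c) hndR' (fun x hx => hsub x (by simp [hx]))
      (fun s hs => by
        have hss : (s == server) = false := by
          simp only [beq_eq_false_iff_ne, ne_eq]
          exact fun he => hnoR (he ▸ hs)
        simp only [hss, Bool.false_eq_true, if_false]
        exact h3 s (by simp [hs]))
      (fun c => by
        rw [pv_contains_update, pv_contains_filter, h4 c]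
        by_cases hu : u c = true
        · simp [hu]
        · simp only [Bool.not_eq_true] at hu
          simp [hu])]
    show pvG d1 (pvFinal (pvCS d1) R _ _) = pvG d1 (pvFinal (pvCS d1) (server :: R) u cur)
    simp only [pvFinal]
    rw [pvFinal_congr (pvCS d1) R (fun c => u c || (pvCS d1 server).contains c)
      (fun s => if s == server
          then ((cur server).filter (fun y => ! ((pvCS d1 server).contains y && seen.contains y)))
          else cur s)
      (fun s => if s == server then (pvCS d1 server).filter (fun c => ! u c) else cur s)
      (fun s _ => by
        by_cases hss : s = server
        · simp only [hss, show (server == server) = true by simp, if_true]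
          rw [h3 server (by simp)]
          refine List.filter_congr (fun y hy => ?_)
          have hcy : (pvCS d1 server).contains y = true := by
            simpa [List.contains_iff_mem] using hy
          show (! ((pvCS d1 server).contains y && PySem.Set.contains seen y)) = _
          rw [hcy, h4 y]
          simp
        · simp [show (s == server) = false by simp [hss]])]


theorem pv_phase2 (d1 : pvD) (hnd : d1.keys.Nodup)
    (hHas : ∀ p ∈ d1.items, p.2.contains "channel_set" = true)
    (hInnd : ∀ p ∈ d1.items, p.2.keys.Nodup)
    (hS1nd : ∀ s, (pvCS d1 s).Nodup) :
    pvA2 d1 = pvB2 d1 := by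
  have hself := pvG_self d1 hnd hInnd
  have h1 : ∀ s ∈ d1.keys, pvCS d1 s = (pvCS d1 s).filter (fun c => ! (fun _ : String => false) c) := by
    intro s _
    simp
  have h2 : ∀ s, s ∉ d1.keys → ∀ c ∈ pvCS d1 s, (fun _ : String => false) c = true := by
    intro s hs c hc
    rw [pvCS_not d1 s hs] at hc
    simp at hc
  have hA := pvA2_main d1 hnd hHas d1.keys (pvCS d1) (fun _ => false) hnd (fun x hx => hx) h1 h2
  have hB := pvB2_main d1 hnd hHas hS1nd d1.keys (pvCS d1) PySem.Set.empty (fun _ => false) hnd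
    (fun x hx => hx) (fun s _ => rfl) (fun c => rfl)
  rw [hself] at hA hB
  show List.foldl _ d1 _ = (List.foldl _ (d1, PySem.Set.empty) _).1
  rw [hA, hB]

theorem pv_main (cs : List (String × List (String × List String)))
    (h : Pre_eliminate_duplicate_servers cs) :
    eliminate_duplicate_servers cs = eliminate_duplicate_servers_alt cs := by
  obtain ⟨hnd0, hps⟩ := h
  have hk0 : (pvWrap cs).keys.Nodup := by
    have : (pvWrap cs).keys = cs.map Prod.fst := by
      simp [pvWrap, PySem.Dict.keys, Function.comp_def]
    rw [this]
    exact hnd0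
  have hph1 := pv_phase1 (pvWrap cs) hk0
  -- facts about the dict after phase 1
  set d1 := pvBdel (pvWrap cs) (pvB1 (pvWrap cs)) with hd1
  have hsubitems : ∀ p ∈ d1.items, p ∈ (pvWrap cs).items := by
    intro p hp
    rw [hd1, pvBdel_eq] at hp
    exact List.mem_of_mem_filter hp
  have hshape : ∀ p ∈ (pvWrap cs).items, ∃ q ∈ cs, p = (q.1, PySem.Dict.mk q.2) := by
    intro p hp
    obtain ⟨q, hq, hqe⟩ := List.mem_map.mp hp
    exact ⟨q, hq, hqe.symm⟩
  have hnd1 : d1.keys.Nodup := by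
    rw [hd1, pvBdel_eq]
    have hsub := (List.filter_sublist
      (p := fun p : String × PySem.Dict String (List String) => (pvB1 (pvWrap cs)).contains p.1)
      (l := (pvWrap cs).items)).map (fun p => p.1)
    exact hsub.nodup hk0
  have hHas1 : ∀ p ∈ d1.items, p.2.contains "channel_set" = true := by
    intro p hp
    obtain ⟨q, hq, hqe⟩ := hshape p (hsubitems p hp)
    obtain ⟨_, ⟨r, hr, hr1⟩, _⟩ := hps q hq
    rw [hqe]
    show (PySem.Dict.mk q.2).contains "channel_set" = true
    simp only [PySem.Dict.contains, List.any_eq_true]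
    exact ⟨r, hr, by simp [hr1]⟩
  have hInnd1 : ∀ p ∈ d1.items, p.2.keys.Nodup := by
    intro p hp
    obtain ⟨q, hq, hqe⟩ := hshape p (hsubitems p hp)
    rw [hqe]
    show (q.2.map (fun x => x.1)).Nodup
    exact (hps q hq).1
  have hS1nd1 : ∀ s, (pvCS d1 s).Nodup := by
    intro s
    simp only [pvCS, PySem.Dict.getD, PySem.Dict.get?]
    cases hfind : d1.items.find? (fun p => p.1 == s) with
    | none => simp [PySem.Dict.empty]
    | some p =>
      simp only [Option.map_some, Option.getD_some]
      obtain ⟨q, hq, hqe⟩ := hshape p (List.mem_of_find?_eq_some hfind |> hsubitems p)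
      rw [hqe]
      show ((PySem.Dict.mk q.2).getD "channel_set" []).Nodup
      simp only [PySem.Dict.getD, PySem.Dict.get?]
      cases hfind2 : q.2.find? (fun r => r.1 == "channel_set") with
      | none => simp
      | some r =>
        simp only [Option.map_some, Option.getD_some]
        have hr1 : r.1 = "channel_set" := by simpa using List.find?_some hfind2
        exact (hps q hq).2.2 r (List.mem_of_find?_eq_some hfind2) hr1
  show pvUnwrap (pvA2 (pvA1 (pvWrap cs))) = pvUnwrap (pvB2 d1)
  rw [hph1]
  rw [pv_phase2 d1 hnd1 hHas1 hInnd1 hS1nd1]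

-- ===== VERDICT (by name: the statement is the Claim_ definition above) =====
theorem eliminate_duplicate_servers_spec : Claim_equal_eliminate_duplicate_servers := by
  intro cs _ hpre
  exact pv_main cs hpre
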